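-- pv_equiv track=rewrite | github.com/YektaDemirci/undergrad_assignments | BachelorGraduationProject_EE493-494/kosma4unEdit.py | pathArray
-- ===== SOURCE A (Python) =====
-- def pathArray(sonYol,window,currX,currY):
--
--     indx=0
--     finYol=[[]]
--     finYol[indx].append(sonYol[0])
--
--
--
--     for i in range(1,len(sonYol)):
--         if finYol[indx][-1] == sonYol[i]:
--             finYol[indx].append(sonYol[i])
--         else:
--             finYol.append([])
--             indx=indx+1
--             finYol[indx].append(sonYol[i])
--
--     ultraFin=[]
--
--     for i in finYol:
--         uzunluk=len(i)
--         if i[0]==1: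
--             currX=currX+uzunluk*window
--             currY=currY
--
--             ultraFin.append([currX,currY])
--
--         elif i[0]==3:
--
--             currX=currX-uzunluk*window
--             currY=currY
--
--             ultraFin.append([currX,currY])
--
--         elif i[0]==2:
--             currY=currY-uzunluk*window
--             currX=currX
--
--             ultraFin.append([currX,currY])
--
--         if i[0]==4:
--             currY=currY+uzunluk*window
--             currX=currX
--             ultraFin.append([currX,currY])
--         else:
--             continue
--
--     return ultraFin
-- ===== SOURCE B (Python) =====
-- def _move(cur, d, x, y):
--     if cur == 1:
--         return (x + d, y)
--     if cur == 3:
--         return (x - d, y)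
--     if cur == 2:
--         return (x, y - d)
--     if cur == 4:
--         return (x, y + d)
--     return None
--
-- def pathArray(sonYol, window, currX, currY):
--     out = []
--     cur = sonYol[0]
--     cnt = 1
--     for v in sonYol[1:]:
--         if v == cur:
--             cnt += 1
--         else:
--             step = _move(cur, cnt * window, currX, currY)
--             if step is not None:
--                 currX, currY = step
--                 out.append([currX, currY])
--             cur, cnt = v, 1
--     step = _move(cur, cnt * window, currX, currY)
--     if step is not None:
--         currX, currY = step
--         out.append([currX, currY])
--     return out
-- ===== Notes on version B (the rewrite author's own statement) =====
-- stated objective: simpler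
-- what changed: B drops A's intermediate list-of-runs (finYol) entirely: a single pass keeps only the current direction and a run length, flushing each run into a coordinate point via one _move helper instead of A's two-pass build-runs-then-branch-chain.
import Mathlib
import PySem

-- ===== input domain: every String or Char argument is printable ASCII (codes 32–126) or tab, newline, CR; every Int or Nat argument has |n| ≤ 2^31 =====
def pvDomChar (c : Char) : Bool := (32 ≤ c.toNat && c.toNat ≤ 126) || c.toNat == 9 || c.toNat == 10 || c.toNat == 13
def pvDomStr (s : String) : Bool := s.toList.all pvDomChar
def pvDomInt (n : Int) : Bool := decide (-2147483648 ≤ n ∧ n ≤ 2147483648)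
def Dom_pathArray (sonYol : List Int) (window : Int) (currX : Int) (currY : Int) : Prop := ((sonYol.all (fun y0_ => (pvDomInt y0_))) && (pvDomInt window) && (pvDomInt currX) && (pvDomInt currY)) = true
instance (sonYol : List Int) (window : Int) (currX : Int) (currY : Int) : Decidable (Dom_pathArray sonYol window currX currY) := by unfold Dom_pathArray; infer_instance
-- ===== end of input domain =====

-- B replaces A's two passes (build run lists, then branch over them) by one pass that
-- keeps only the current direction and run count; return values agree on all nonempty inputs.

-- ===== PORT A =====
-- the run-building loop step: append sonYol[i] to the last run if it matches that run's
-- last element, else start a new run (finYol[indx][-1] == sonYol[i])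
def stepRun (fin : List (List Int)) (x : Int) : List (List Int) :=
  if (fin.getLastD []).getLast? = some x then fin.dropLast ++ [fin.getLastD [] ++ [x]]
  else fin ++ [[x]]

-- the second loop's body: the elif chain on i[0] (1/3/2), then the separate `if i[0]==4`
-- (runs are nonempty by construction, so headD 0 is exactly i[0])
def stepEmit (window : Int) (st : Int × Int × List (List Int)) (i : List Int) :
    Int × Int × List (List Int) :=
  let x := st.1; let y := st.2.1; let u := st.2.2
  let uzunluk : Int := (i.length : Int)
  let h := i.headD 0
  let s1 :=
    if h = 1 then (x + uzunluk * window, y, u ++ [[x + uzunluk * window, y]])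
    else if h = 3 then (x - uzunluk * window, y, u ++ [[x - uzunluk * window, y]])
    else if h = 2 then (x, y - uzunluk * window, u ++ [[x, y - uzunluk * window]])
    else (x, y, u)
  if h = 4 then (s1.1, s1.2.1 + uzunluk * window, s1.2.2 ++ [[s1.1, s1.2.1 + uzunluk * window]])
  else s1

def pathArray (sonYol : List Int) (window : Int) (currX : Int) (currY : Int) : List (List Int) :=
  match sonYol with
  | [] => []  -- Python raises IndexError on sonYol[0]; excluded by Pre_pathArray
  | s0 :: rest =>
    let finYol := rest.foldl stepRun [[s0]]
    (finYol.foldl (stepEmit window) (currX, currY, [])).2.2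

-- ===== PORT B =====
def pvMove (cur d x y : Int) : Option (Int × Int) :=
  if cur = 1 then some (x + d, y)
  else if cur = 3 then some (x - d, y)
  else if cur = 2 then some (x, y - d)
  else if cur = 4 then some (x, y + d)
  else none

-- Source B's single loop: state = (current direction, run count, position, output)
def goB : List Int → Int → Int → Int → Int → Int → List (List Int) → List (List Int)
  | [], cur, cnt, window, x, y, out =>
    match pvMove cur (cnt * window) x y with
    | some (x', y') => out ++ [[x', y']]
    | none => out
  | v :: t, cur, cnt, window, x, y, out =>
    if v = cur then goB t cur (cnt + 1) window x y out
    else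
      match pvMove cur (cnt * window) x y with
      | some (x', y') => goB t v 1 window x' y' (out ++ [[x', y']])
      | none => goB t v 1 window x y out

def pathArray_alt (sonYol : List Int) (window : Int) (currX : Int) (currY : Int) : List (List Int) :=
  match sonYol with
  | [] => []  -- Python raises IndexError on sonYol[0]; excluded by Pre_pathArray
  | c :: rest => goB rest c 1 window currX currY []

-- ===== PRECONDITION & SPEC =====
-- both Pythons raise IndexError on the empty list (sonYol[0]); nothing else raises
def Pre_pathArray (sonYol : List Int) (window : Int) (currX : Int) (currY : Int) : Prop :=
  sonYol ≠ []
instance (sonYol : List Int) (window : Int) (currX : Int) (currY : Int) : Decidable (Pre_pathArray sonYol window currX currY) := by unfold Pre_pathArray; infer_instance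
def pvWitness_pathArray : List Int × Int × Int × Int := ([1, 1, 2, 4, 5], 2, 0, 0)

def Spec_pathArray (sonYol : List Int) (window : Int) (currX : Int) (currY : Int) (out : List (List Int)) : Prop := out = pathArray_alt sonYol window currX currY
instance (sonYol : List Int) (window : Int) (currX : Int) (currY : Int) (out : List (List Int)) : Decidable (Spec_pathArray sonYol window currX currY out) := by unfold Spec_pathArray; infer_instance

-- ===== CLAIM (what is proved, stated in full; the proofs are below) =====
def Claim_equal_pathArray : Prop := ∀ (sonYol : List Int) (window : Int) (currX : Int) (currY : Int), Dom_pathArray sonYol window currX currY → Pre_pathArray sonYol window currX currY → Spec_pathArray sonYol window currX currY (pathArray sonYol window currX currY)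

-- ===== LEMMAS AND PROOFS =====

-- a run (c, n) stands for n+1 consecutive copies of direction c
def toRun (p : Int × Nat) : List Int := p.1 :: List.replicate p.2 p.1

-- run-length encoding of (replicate (n+1) c ++ l), the common abstraction of both passes
def rle (c : Int) (n : Nat) : List Int → List (Int × Nat)
  | [] => [(c, n)]
  | h :: t => if h = c then rle c (n + 1) t else (c, n) :: rle h 0 t

-- emit the coordinate points of a list of runs
def emitAll (window : Int) : List (Int × Nat) → Int → Int → List (List Int) → List (List Int)
  | [], _, _, u => u
  | (c, n) :: t, x, y, u =>
    match pvMove c (((n : Int) + 1) * window) x y with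
    | some (x', y') => emitAll window t x' y' (u ++ [[x', y']])
    | none => emitAll window t x y u

theorem getLast?_toRun (c : Int) (n : Nat) : (toRun (c, n)).getLast? = some c := by
  induction n with
  | zero => rfl
  | succ m ih =>
    simpa [toRun, List.replicate_succ, List.getLast?_cons_cons] using ih

theorem toRun_snoc (c : Int) (n : Nat) : toRun (c, n) ++ [c] = toRun (c, n + 1) := by
  simp [toRun, List.replicate_succ']

theorem foldl_stepRun (l : List Int) : ∀ (rs : List (Int × Nat)) (c : Int) (n : Nat),
    l.foldl stepRun (rs.map toRun ++ [toRun (c, n)]) = rs.map toRun ++ (rle c n l).map toRun := by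
  induction l with
  | nil => intro rs c n; simp [rle]
  | cons h t ih =>
    intro rs c n
    by_cases hc : h = c
    · subst hc
      rw [List.foldl_cons]
      have : stepRun (rs.map toRun ++ [toRun (h, n)]) h = rs.map toRun ++ [toRun (h, n + 1)] := by
        simp [stepRun, getLast?_toRun, toRun_snoc]
      rw [this, ih, rle]
      simp
    · rw [List.foldl_cons]
      have : stepRun (rs.map toRun ++ [toRun (c, n)]) h
          = (rs ++ [(c, n)]).map toRun ++ [toRun (h, 0)] := by
        have hg := getLast?_toRun c n
        rw [stepRun, List.getLastD_concat, hg, if_neg (by simp [Ne.symm hc])]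
        simp [toRun]
      rw [this, ih (rs ++ [(c, n)]) h 0, rle]
      simp [hc]

theorem stepEmit_toRun (window x y : Int) (u : List (List Int)) (c : Int) (n : Nat) :
    stepEmit window (x, y, u) (toRun (c, n))
      = match pvMove c (((n : Int) + 1) * window) x y with
        | some (x', y') => (x', y', u ++ [[x', y']])
        | none => (x, y, u) := by
  have hlen : ((toRun (c, n)).length : Int) = (n : Int) + 1 := by
    simp [toRun]
  have hh : (toRun (c, n)).headD 0 = c := rfl
  simp only [stepEmit, hlen, hh, pvMove]
  split_ifs with h1 h4 h3 h4 h2 h4 h4 <;> simp_all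

theorem foldl_stepEmit (window : Int) (ps : List (Int × Nat)) : ∀ (x y : Int) (u : List (List Int)),
    ((ps.map toRun).foldl (stepEmit window) (x, y, u)).2.2 = emitAll window ps x y u := by
  induction ps with
  | nil => intro x y u; simp [emitAll]
  | cons p t ih =>
    intro x y u
    obtain ⟨c, n⟩ := p
    rw [List.map_cons, List.foldl_cons, stepEmit_toRun]
    cases hm : pvMove c (((n : Int) + 1) * window) x y with
    | none => simp [emitAll, hm, ih]
    | some xy => obtain ⟨x', y'⟩ := xy; simp [emitAll, hm, ih]

theorem goB_eq_emitAll (l : List Int) : ∀ (c : Int) (n : Nat) (window x y : Int) (u : List (List Int)),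
    goB l c ((n : Int) + 1) window x y u = emitAll window (rle c n l) x y u := by
  induction l with
  | nil =>
    intro c n window x y u
    simp [goB, rle, emitAll]
  | cons h t ih =>
    intro c n window x y u
    by_cases hc : h = c
    · subst hc
      rw [goB, if_pos rfl, rle, if_pos rfl]
      have : (n : Int) + 1 + 1 = ((n + 1 : Nat) : Int) + 1 := by push_cast; ring
      rw [this, ih]
    · have ih0 : ∀ (x y : Int) (u : List (List Int)),
          goB t h 1 window x y u = emitAll window (rle h 0 t) x y u := by
        intro x y u
        have := ih h 0 window x y u
        norm_num at this
        exact this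
      rw [goB, if_neg hc,
        show rle c n (h :: t) = (c, n) :: rle h 0 t from by rw [rle, if_neg hc], emitAll]
      cases hm : pvMove c (((n : Int) + 1) * window) x y with
      | none => exact ih0 x y u
      | some xy =>
        obtain ⟨x', y'⟩ := xy
        exact ih0 x' y' (u ++ [[x', y']])

-- ===== VERDICT (by name: the statement is the Claim_ definition above) =====
theorem pathArray_spec : Claim_equal_pathArray := by
  intro sonYol window currX currY _ hpre
  unfold Spec_pathArray
  cases sonYol with
  | nil => exact absurd rfl hpre
  | cons c rest =>
    show ((rest.foldl stepRun [[c]]).foldl (stepEmit window) (currX, currY, [])).2.2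
        = goB rest c 1 window currX currY []
    have h1 : ([[c]] : List (List Int)) = ([] : List (Int × Nat)).map toRun ++ [toRun (c, 0)] := rfl
    rw [h1, foldl_stepRun rest [] c 0]
    have h2 : (1 : Int) = ((0 : Nat) : Int) + 1 := by norm_num
    rw [List.map_nil, List.nil_append, foldl_stepEmit, h2, goB_eq_emitAll]
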